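-- pv_equiv track=rewrite | github.com/nicosalaz/MetodosNumericos | calculadora/ecuaciones_no_lineales/views.py | sacarValoresDeFuncion
-- ===== SOURCE A (Python) =====
-- def sacarValoresDeFuncion(funcion):
--     i=0
--     aux=""
--     lista= list()
--     fin=len(funcion)-1
--     while i<len(funcion):
--         if funcion[i]=="+":
--             lista.append(aux)
--             aux=""
--         if funcion[i]=="-" and i != 0:
--             lista.append(aux)
--             aux=""
--         if i== fin:
--             aux += funcion[fin]
--             lista.append(aux)
--             aux=""
--         else:
--                 aux+=funcion[i]
--         i+=1
--
--     return lista
-- ===== SOURCE B (Python) =====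
-- def sacarValoresDeFuncion(funcion):
--     if not funcion:
--         return []
--     cuts = [0]
--     for i, ch in enumerate(funcion):
--         if ch == "+" or (ch == "-" and i != 0):
--             cuts.append(i)
--     return [funcion[a:b] for a, b in zip(cuts, cuts[1:])] + [funcion[cuts[-1]:]]
-- ===== Notes on version B (the rewrite author's own statement) =====
-- stated objective: faster
-- what changed: B replaces A's single stateful scan (mutable token buffer grown by repeated string concatenation and flushed at signs and at the last index) by an index-then-slice decomposition: one pass collects cut positions, then tokens are produced as slices between consecutive cuts plus a final slice-to-end.
import Mathlib
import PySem

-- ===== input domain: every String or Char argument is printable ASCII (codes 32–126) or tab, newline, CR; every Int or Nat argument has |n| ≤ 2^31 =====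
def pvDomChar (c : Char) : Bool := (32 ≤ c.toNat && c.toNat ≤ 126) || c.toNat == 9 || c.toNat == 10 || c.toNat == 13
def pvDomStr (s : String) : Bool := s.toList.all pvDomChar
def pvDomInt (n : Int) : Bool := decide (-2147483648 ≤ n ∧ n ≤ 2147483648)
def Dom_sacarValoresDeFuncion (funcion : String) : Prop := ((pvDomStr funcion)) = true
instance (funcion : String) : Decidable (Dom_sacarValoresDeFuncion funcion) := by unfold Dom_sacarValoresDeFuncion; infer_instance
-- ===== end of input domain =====

-- B rebuilds the result from a list of cut positions and slices instead of A's stateful buffer scan, avoiding A's repeated string concatenation (objective: faster, measured).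

-- ===== PORT A =====
-- A's while-loop: index i, mutable aux and lista; fin = len-1.
-- In the `i == fin` branch Python reads funcion[fin]; since i = fin there, it is the
-- current character c, which is what the port uses.
def pvGoA (s : List Char) (fin : Nat) (i : Nat) (aux : List Char) (lista : List (List Char)) : List (List Char) :=
  if h : i < s.length then
    let c := s[i]
    let lista1 := if c = '+' then lista ++ [aux] else lista
    let aux1 : List Char := if c = '+' then [] else aux
    let lista2 := if c = '-' ∧ i ≠ 0 then lista1 ++ [aux1] else lista1
    let aux2 : List Char := if c = '-' ∧ i ≠ 0 then [] else aux1
    if i = fin then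
      pvGoA s fin (i + 1) [] (lista2 ++ [aux2 ++ [c]])
    else
      pvGoA s fin (i + 1) (aux2 ++ [c]) lista2
  else lista
termination_by s.length - i

def sacarValoresDeFuncion (funcion : String) : List String :=
  (pvGoA funcion.toList (funcion.toList.length - 1) 0 [] []).map String.ofList

-- ===== PORT B =====
-- Python slice funcion[a:b] for 0 ≤ a, b (exact there):
def pvSlice (s : List Char) (a b : Nat) : List Char := (s.drop a).take (b - a)

-- Source B's `for i, ch in enumerate(funcion): if … : cuts.append(i)` loop, as a
-- structural recursion carrying the (always nonnegative) index i.
def pvCuts (s : List Char) (i : Nat) : List Nat :=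
  match s with
  | [] => []
  | c :: rest => if c = '+' ∨ (c = '-' ∧ i ≠ 0) then i :: pvCuts rest (i + 1) else pvCuts rest (i + 1)

def sacarValoresDeFuncion_alt (funcion : String) : List String :=
  let s := funcion.toList
  if s = [] then []
  else
    let cuts : List Nat := 0 :: pvCuts s 0
    ((cuts.zip cuts.tail).map (fun p => String.ofList (pvSlice s p.1 p.2)))
      ++ [String.ofList (s.drop (cuts.getLastD 0))]

-- ===== PRECONDITION & SPEC =====
def Spec_sacarValoresDeFuncion (funcion : String) (out : List String) : Prop := out = sacarValoresDeFuncion_alt funcion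
instance (funcion : String) (out : List String) : Decidable (Spec_sacarValoresDeFuncion funcion out) := by unfold Spec_sacarValoresDeFuncion; infer_instance

-- ===== CLAIM (what is proved, stated in full; the proofs are below) =====
def Claim_equal_sacarValoresDeFuncion : Prop := ∀ (funcion : String), Dom_sacarValoresDeFuncion funcion → Spec_sacarValoresDeFuncion funcion (sacarValoresDeFuncion funcion)

-- ===== LEMMAS AND PROOFS =====

-- tokens described by a cut list (the common shape both sides are reduced to)
def pvSlices (s : List Char) : List Nat → List (List Char)
  | [] => []
  | [a] => [s.drop a]
  | a :: b :: rest => pvSlice s a b :: pvSlices s (b :: rest)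

theorem pvSlice_to_end (s : List Char) (c : Nat) : pvSlice s c s.length = s.drop c := by
  unfold pvSlice
  exact List.take_of_length_le (by simp)

theorem pvSlice_snoc (s : List Char) (c i : Nat) (hci : c ≤ i) (hi : i < s.length) :
    pvSlice s c i ++ [s[i]] = pvSlice s c (i + 1) := by
  unfold pvSlice
  have h1 : i + 1 - c = (i - c) + 1 := by omega
  rw [h1, List.take_add_one]
  have h2 : (s.drop c)[i - c]? = some s[i] := by
    rw [List.getElem?_drop]
    have : c + (i - c) = i := by omega
    rw [this, List.getElem?_eq_getElem hi]
  simp [h2]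

theorem pvDrop_last (s : List Char) (i : Nat) (hi : i < s.length) (hl : i + 1 = s.length) :
    s.drop i = [s[i]] := by
  rw [List.drop_eq_getElem_cons hi, hl]
  simp

theorem pvZip_slices (s : List Char) (l : List Nat) (a : Nat) :
    (((a :: l).zip l).map (fun p => pvSlice s p.1 p.2)) ++ [s.drop ((a :: l).getLastD 0)]
      = pvSlices s (a :: l) := by
  induction l generalizing a with
  | nil => simp [pvSlices]
  | cons b rest ih =>
    simp only [List.zip_cons_cons, List.map_cons, List.cons_append, pvSlices]
    rw [← ih b]
    simp

-- main loop invariant: at position i with pending token s[c:i], A's loop produces the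
-- slices determined by the remaining cut positions
theorem pvGoA_eq_slices (s : List Char) (t : List Char) (i c : Nat) (lista : List (List Char))
    (ht : t = s.drop i) (hci : c ≤ i) (hi : i < s.length) :
    pvGoA s (s.length - 1) i (pvSlice s c i) lista = lista ++ pvSlices s (c :: pvCuts t i) := by
  induction t generalizing i c lista with
  | nil =>
    exfalso
    have : (s.drop i).length = 0 := by rw [← ht]; rfl
    simp at this; omega
  | cons ch rest ih =>
    have hhead : ch :: rest = s[i] :: s.drop (i + 1) := by
      rw [ht]; exact List.drop_eq_getElem_cons hi
    obtain ⟨hch, hrest⟩ := List.cons_eq_cons.mp hhead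
    rw [pvGoA]
    simp only [dif_pos hi]
    by_cases hcut : s[i] = '+' ∨ (s[i] = '-' ∧ i ≠ 0)
    · -- a cut position
      have hcuts : pvCuts (ch :: rest) i = i :: pvCuts rest (i + 1) := by
        rw [pvCuts, hch]; simp only [if_pos hcut]
      have haux2 : (if s[i] = '-' ∧ i ≠ 0 then ([] : List Char)
          else if s[i] = '+' then [] else pvSlice s c i) = ([] : List Char) := by
        rcases hcut with h | h
        · simp [h]
        · simp [h]
      have hlista2 : (if s[i] = '-' ∧ i ≠ 0 then
            (if s[i] = '+' then lista ++ [pvSlice s c i] else lista)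
              ++ [if s[i] = '+' then ([] : List Char) else pvSlice s c i]
          else if s[i] = '+' then lista ++ [pvSlice s c i] else lista)
          = lista ++ [pvSlice s c i] := by
        rcases hcut with h | h
        · have : ¬ (s[i] = '-' ∧ i ≠ 0) := by rintro ⟨h2, _⟩; rw [h] at h2; exact absurd h2 (by decide)
          simp [h]
        · simp [h]
      simp only [haux2, hlista2, List.nil_append]
      by_cases hfin : i = s.length - 1
      · -- last position: loop ends after this step
        have hlen : i + 1 = s.length := by omega
        have hrestnil : rest = [] := by
          rw [hrest]; exact List.drop_eq_nil_of_le (by omega)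
        rw [if_pos hfin, pvGoA]
        have : ¬ i + 1 < s.length := by omega
        simp only [dif_neg this]
        rw [hcuts, hrestnil]
        simp only [pvCuts, pvSlices]
        rw [pvDrop_last s i hi hlen]
        simp
      · rw [if_neg hfin]
        have hi1 : i + 1 < s.length := by omega
        have : ([s[i]] : List Char) = pvSlice s i (i + 1) := by
          rw [← pvSlice_snoc s i i (le_refl i) hi]; simp [pvSlice]
        rw [this, ih (i + 1) i (lista ++ [pvSlice s c i]) hrest (by omega) hi1, hcuts]
        simp [pvSlices]
    · -- not a cut position
      have hne1 : ¬ s[i] = '+' := fun h => hcut (Or.inl h)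
      have hne2 : ¬ (s[i] = '-' ∧ i ≠ 0) := fun h => hcut (Or.inr h)
      have hcuts : pvCuts (ch :: rest) i = pvCuts rest (i + 1) := by
        rw [pvCuts, hch]
        rw [if_neg (fun hor => hor.elim hne1 hne2)]
      simp only [if_neg hne1, if_neg hne2]
      by_cases hfin : i = s.length - 1
      · have hlen : i + 1 = s.length := by omega
        have hrestnil : rest = [] := by
          rw [hrest]; exact List.drop_eq_nil_of_le (by omega)
        rw [if_pos hfin, pvGoA]
        have : ¬ i + 1 < s.length := by omega
        simp only [dif_neg this]
        rw [hcuts, hrestnil]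
        simp only [pvCuts, pvSlices]
        rw [pvSlice_snoc s c i hci hi, hlen, pvSlice_to_end]
      · rw [if_neg hfin]
        have hi1 : i + 1 < s.length := by omega
        rw [pvSlice_snoc s c i hci hi,
          ih (i + 1) c lista hrest (by omega) hi1, hcuts]

-- ===== VERDICT (by name: the statement is the Claim_ definition above) =====
theorem sacarValoresDeFuncion_spec : Claim_equal_sacarValoresDeFuncion := by
  intro funcion _
  unfold Spec_sacarValoresDeFuncion sacarValoresDeFuncion sacarValoresDeFuncion_alt
  set s := funcion.toList with hs
  by_cases hnil : s = []
  · rw [if_pos hnil, hnil]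
    rw [pvGoA]
    simp
  · rw [if_neg hnil]
    have hlen : 0 < s.length := List.length_pos_of_ne_nil hnil
    have h0 : pvSlice s 0 0 = ([] : List Char) := by simp [pvSlice]
    have hA := pvGoA_eq_slices s s 0 0 [] (by simp) (le_refl 0) hlen
    rw [h0] at hA
    simp only [List.nil_append] at hA
    rw [hA, ← pvZip_slices s (pvCuts s 0) 0]
    simp [List.map_append, List.map_map, Function.comp]
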